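-- pv_equiv track=rewrite | github.com/edwinmahendra/FUNGSI | fungsi.py | gans
-- ===== SOURCE A (Python) =====
-- def gans(n):
--     awal=0
--     angka=1
--     ganjil=[]
--     while awal<n:
--         if angka % 2 != 0:
--             ganjil.append(angka)
--             awal+=1
--         angka+=1
--     return ganjil
-- ===== SOURCE B (Python) =====
-- def gans(n):
--     return [2 * i + 1 for i in range(n)]
-- ===== Notes on version B (the rewrite author's own statement) =====
-- stated objective: simpler
-- what changed: Replaced the while loop that scans every integer and filters odd ones (two counters, parity test) with a direct closed-form comprehension producing the i-th odd number as 2*i+1.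
import Mathlib
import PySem

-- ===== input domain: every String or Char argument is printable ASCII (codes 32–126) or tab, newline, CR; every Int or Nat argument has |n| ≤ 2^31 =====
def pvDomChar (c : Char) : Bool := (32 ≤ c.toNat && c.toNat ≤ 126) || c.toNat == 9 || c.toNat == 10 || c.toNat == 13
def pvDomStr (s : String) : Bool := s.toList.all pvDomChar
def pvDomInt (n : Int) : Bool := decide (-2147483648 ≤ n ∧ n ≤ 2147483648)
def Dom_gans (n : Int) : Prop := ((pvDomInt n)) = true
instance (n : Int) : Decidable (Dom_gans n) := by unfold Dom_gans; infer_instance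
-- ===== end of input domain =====

-- B replaces A's scan-and-filter while loop by the closed form 2*i+1 over range(n): simpler, no parity test.

-- ===== PORT A =====
-- literal transliteration of A's while loop: counters awal (collected) and angka (candidate)
def gansLoop (n awal angka : Int) (ganjil : List Int) : List Int :=
  if _h : awal < n then
    if angka % 2 ≠ 0 then
      gansLoop n (awal + 1) (angka + 1) (ganjil ++ [angka])
    else
      gansLoop n awal (angka + 1) ganjil
  else
    ganjil
termination_by 2 * (n - awal).toNat + (if angka % 2 = 0 then 1 else 0)
decreasing_by
  · have : (n - (awal + 1)).toNat < (n - awal).toNat := by omega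
    split_ifs <;> omega
  · have : angka % 2 = 0 := by omega
    have _h2 : (angka + 1) % 2 ≠ 0 := by omega
    split_ifs <;> omega

def gans (n : Int) : List Int := gansLoop n 0 1 []

-- ===== PORT B =====
def gans_alt (n : Int) : List Int := (PySem.List.pyRange 0 n 1).map (fun i => 2 * i + 1)

-- ===== PRECONDITION & SPEC =====
def Spec_gans (n : Int) (out : List Int) : Prop := out = gans_alt n
instance (n : Int) (out : List Int) : Decidable (Spec_gans n out) := by unfold Spec_gans; infer_instance

-- ===== CLAIM (what is proved, stated in full; the proofs are below) =====
def Claim_equal_gans : Prop := ∀ (n : Int), Dom_gans n → Spec_gans n (gans n)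

-- ===== LEMMAS AND PROOFS =====
theorem gansLoop_inv (n : Int) : ∀ (k : Nat) (awal : Int) (ganjil : List Int),
    (n - awal).toNat = k →
    gansLoop n awal (2 * awal + 1) ganjil
      = ganjil ++ (PySem.List.pyRange awal n 1).map (fun i => 2 * i + 1) := by
  intro k
  induction k with
  | zero =>
    intro awal ganjil hk
    have hge : n ≤ awal := by omega
    rw [gansLoop, PySem.List.pyRange_one_eq_nil hge]
    simp [not_lt.mpr hge]
  | succ m ih =>
    intro awal ganjil hk
    have hlt : awal < n := by omega
    rw [gansLoop]
    have hodd : (2 * awal + 1) % 2 ≠ 0 := by omega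
    simp only [hlt, dif_pos, hodd, if_true, ne_eq, not_false_eq_true]
    rw [PySem.List.pyRange_one_cons hlt]
    -- next iteration: state (awal+1, 2*awal+2) with even angka
    by_cases hlt2 : awal + 1 < n
    · rw [gansLoop]
      have heven : ¬ ((2 * awal + 1 + 1) % 2 ≠ 0) := by omega
      simp only [hlt2, dif_pos, heven, if_false]
      have harg : 2 * awal + 1 + 1 + 1 = 2 * (awal + 1) + 1 := by ring
      rw [harg, ih (awal + 1) (ganjil ++ [2 * awal + 1]) (by omega)]
      simp
    · have hge : n ≤ awal + 1 := by omega
      rw [gansLoop, PySem.List.pyRange_one_eq_nil hge]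
      simp [not_lt.mpr hge]

-- ===== VERDICT (by name: the statement is the Claim_ definition above) =====
theorem gans_spec : Claim_equal_gans := by
  intro n _
  unfold Spec_gans gans gans_alt
  have := gansLoop_inv n (n - 0).toNat 0 [] rfl
  simpa using this
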